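-- pv_equiv track=rewrite | github.com/pawelorenc/WDI | zadanie programowanie 3.12.2024/zad 10.py | szachujace_gonce
-- ===== SOURCE A (Python) =====
-- def szachujace_gonce(dane): #funkcja zwracajaca pozycje goncow wzajemnie się szachujacych
--     szachujace = []
--     for i in range(len(dane)):
--         for j in range(i + 1, len(dane)):
--             wiersz1, kolumna1 = dane[i]
--             wiersz2, kolumna2 = dane[j]
--             #sprawdzamy czy gonce szachuja się (czy sa na tej samej przekatnej)
--             if abs(wiersz1 - wiersz2) == abs(kolumna1 - kolumna2):
--                 szachujace.append((dane[i], dane[j]))  #dodajemy parę gońców szachujących się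
--     return szachujace
-- ===== SOURCE B (Python) =====
-- def szachujace_gonce(dane):
--     # group board indices by diagonal (w - k) and anti-diagonal (w + k),
--     # then for each bishop only visit indices sharing one of its two diagonals
--     diag = {}
--     anti = {}
--     for i, (w, k) in enumerate(dane):
--         diag.setdefault(w - k, []).append(i)
--         anti.setdefault(w + k, []).append(i)
--     szachujace = []
--     for i, (w, k) in enumerate(dane):
--         for j in sorted(set(diag[w - k] + anti[w + k])):
--             if j > i:
--                 szachujace.append(((w, k), dane[j]))
--     return szachujace
-- ===== Notes on version B (the rewrite author's own statement) =====
-- stated objective: faster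
-- what changed: Replaced the all-pairs O(n^2) double loop by grouping indices into two dicts keyed by diagonal (w-k) and anti-diagonal (w+k), then for each bishop visiting only the merged sorted indices of its two diagonal groups.
import Mathlib
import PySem

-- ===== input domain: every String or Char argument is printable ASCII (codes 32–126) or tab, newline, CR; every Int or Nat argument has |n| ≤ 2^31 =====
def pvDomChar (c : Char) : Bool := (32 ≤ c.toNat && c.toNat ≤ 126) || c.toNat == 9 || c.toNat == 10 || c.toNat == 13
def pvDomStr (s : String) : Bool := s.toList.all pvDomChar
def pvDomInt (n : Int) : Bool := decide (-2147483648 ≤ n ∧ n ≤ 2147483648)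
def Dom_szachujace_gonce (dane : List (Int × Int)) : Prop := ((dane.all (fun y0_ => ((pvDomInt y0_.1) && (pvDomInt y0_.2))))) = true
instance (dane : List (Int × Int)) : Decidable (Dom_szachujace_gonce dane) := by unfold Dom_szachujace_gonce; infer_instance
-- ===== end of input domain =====

-- B groups indices by diagonal and anti-diagonal in two dicts, so only same-diagonal
-- index pairs are visited (measured faster than A's all-pairs double loop).

-- ===== PORT A =====
def szachujace_gonce (dane : List (Int × Int)) : List ((Int × Int) × (Int × Int)) :=
  (PySem.List.pyRange 0 dane.length 1).foldl (fun acc i =>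
    (PySem.List.pyRange (i + 1) dane.length 1).foldl (fun acc2 j =>
      -- wiersz1, kolumna1 = dane[i]; wiersz2, kolumna2 = dane[j]  (i, j always in range)
      if ((PySem.List.pyGetD dane i (0, 0)).1 - (PySem.List.pyGetD dane j (0, 0)).1).natAbs
          = ((PySem.List.pyGetD dane i (0, 0)).2 - (PySem.List.pyGetD dane j (0, 0)).2).natAbs
      then acc2 ++ [(PySem.List.pyGetD dane i (0, 0), PySem.List.pyGetD dane j (0, 0))] else acc2)
      acc)
    []

-- ===== PORT B =====
-- diag.setdefault(w - k, []).append(i) is ported as insert key (getD key [] ++ [i]):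
-- exact, since PySem.Dict.insert overwrites in place and only getD lookups follow.
-- the first loop of Source B: build the two grouping dicts (diag, anti) in one pass
def pvGroups (dane : List (Int × Int)) : PySem.Dict Int (List Int) × PySem.Dict Int (List Int) :=
  (PySem.List.enumerate dane 0).foldl
    (fun (g : PySem.Dict Int (List Int) × PySem.Dict Int (List Int)) p =>
      (g.1.insert (p.2.1 - p.2.2) (g.1.getD (p.2.1 - p.2.2) [] ++ [p.1]),
       g.2.insert (p.2.1 + p.2.2) (g.2.getD (p.2.1 + p.2.2) [] ++ [p.1])))
    (PySem.Dict.empty, PySem.Dict.empty)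

def szachujace_gonce_alt (dane : List (Int × Int)) : List ((Int × Int) × (Int × Int)) :=
  (PySem.List.enumerate dane 0).foldl
    (fun acc p =>
      (PySem.List.sorted
          (PySem.Set.ofList ((pvGroups dane).1.getD (p.2.1 - p.2.2) []
                             ++ (pvGroups dane).2.getD (p.2.1 + p.2.2) []))
          (fun x => x) false).foldl
        (fun acc2 j =>
          if j > p.1 then acc2 ++ [(p.2, PySem.List.pyGetD dane j (0, 0))] else acc2)
        acc)
    []

-- ===== PRECONDITION & SPEC =====
def Spec_szachujace_gonce (dane : List (Int × Int)) (out : List ((Int × Int) × (Int × Int))) : Prop := out = szachujace_gonce_alt dane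
instance (dane : List (Int × Int)) (out : List ((Int × Int) × (Int × Int))) : Decidable (Spec_szachujace_gonce dane out) := by unfold Spec_szachujace_gonce; infer_instance

-- ===== CLAIM (what is proved, stated in full; the proofs are below) =====
def Claim_equal_szachujace_gonce : Prop := ∀ (dane : List (Int × Int)), Dom_szachujace_gonce dane → Spec_szachujace_gonce dane (szachujace_gonce dane)

-- ===== LEMMAS AND PROOFS =====

-- value of one grouping dict after the build fold, for any key
theorem pv_build_getD {α : Type} (f : α → Int) (xs : List α) (s : Int)
    (d0 : PySem.Dict Int (List Int)) (κ : Int) :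
    (((PySem.List.enumerate xs s).foldl
        (fun d p => d.insert (f p.2) (d.getD (f p.2) [] ++ [p.1])) d0).getD κ [])
    = d0.getD κ [] ++ (((PySem.List.enumerate xs s).filter (fun p => f p.2 = κ)).map (·.1)) := by
  induction xs generalizing s d0 with
  | nil => simp [PySem.List.enumerate_nil]
  | cons x xs ih =>
    rw [PySem.List.enumerate_cons]
    simp only [List.foldl_cons, List.filter_cons]
    by_cases h : f x = κ
    · subst h
      rw [ih, PySem.Dict.getD_insert_self]
      simp
    · rw [ih, PySem.Dict.getD_insert_of_ne _ _ _ (by simpa using Ne.symm h)]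
      simp [h]

-- each grouping dict maps a key to exactly the indices of the bishops on that diagonal
theorem pvGroups_getD (dane : List (Int × Int)) (κ : Int) :
    (pvGroups dane).1.getD κ []
      = (PySem.List.pyRange 0 dane.length 1).filter
          (fun j => (PySem.List.pyGetD dane j (0, 0)).1 - (PySem.List.pyGetD dane j (0, 0)).2 = κ)
    ∧ (pvGroups dane).2.getD κ []
      = (PySem.List.pyRange 0 dane.length 1).filter
          (fun j => (PySem.List.pyGetD dane j (0, 0)).1 + (PySem.List.pyGetD dane j (0, 0)).2 = κ) := by
  unfold pvGroups
  rw [PySem.List.foldl_prod_mk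
        (fun (d : PySem.Dict Int (List Int)) (p : Int × (Int × Int)) =>
          d.insert (p.2.1 - p.2.2) (d.getD (p.2.1 - p.2.2) [] ++ [p.1]))
        (fun (d : PySem.Dict Int (List Int)) (p : Int × (Int × Int)) =>
          d.insert (p.2.1 + p.2.2) (d.getD (p.2.1 + p.2.2) [] ++ [p.1]))]
  constructor
  · refine Eq.trans (pv_build_getD (fun q => q.1 - q.2) dane 0 PySem.Dict.empty κ) ?_
    have hen := PySem.List.enumerate_eq_map_pyRange dane ((0 : Int), (0 : Int))
    rw [hen]
    simp [List.filter_map, List.map_map, Function.comp_def]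
  · refine Eq.trans (pv_build_getD (fun q => q.1 + q.2) dane 0 PySem.Dict.empty κ) ?_
    have hen := PySem.List.enumerate_eq_map_pyRange dane ((0 : Int), (0 : Int))
    rw [hen]
    simp [List.filter_map, List.map_map, Function.comp_def]

-- Prop-condition corollary of PySem.List.foldl_append_if
theorem pv_foldl_append_ite {α β : Type} (P : α → Prop) [DecidablePred P] (f : α → β)
    (l : List α) (acc : List β) :
    l.foldl (fun acc x => if P x then acc ++ [f x] else acc) acc
      = acc ++ (l.filter (fun x => decide (P x))).map f := by
  simpa using PySem.List.foldl_append_if (fun x => decide (P x)) f l acc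

-- ===== VERDICT =====
theorem szachujace_gonce_spec : Claim_equal_szachujace_gonce := by
  intro dane _
  unfold Spec_szachujace_gonce szachujace_gonce szachujace_gonce_alt
  -- notation
  set n : Int := (dane.length : Int) with hn
  have hen := PySem.List.enumerate_eq_map_pyRange dane ((0 : Int), (0 : Int))
  -- rewrite B's outer fold over enumerate into a fold over the index range
  rw [hen, List.foldl_map]
  -- compare the two folds over pyRange 0 n 1 step by step
  apply PySem.List.foldl_congr_mem
  intro acc i hi
  have hi' : 0 ≤ i ∧ i < n := by
    have := (PySem.List.mem_pyRange_one).1 hi; simpa [hn] using this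
  dsimp only
  -- both inner loops are append-if folds
  rw [pv_foldl_append_ite
        (fun j => ((PySem.List.pyGetD dane i (0, 0)).1 - (PySem.List.pyGetD dane j (0, 0)).1).natAbs
          = ((PySem.List.pyGetD dane i (0, 0)).2 - (PySem.List.pyGetD dane j (0, 0)).2).natAbs)
        (fun j => (PySem.List.pyGetD dane i (0, 0), PySem.List.pyGetD dane j (0, 0))),
      pv_foldl_append_ite (fun j => j > i)
        (fun j => (PySem.List.pyGetD dane i (0, 0), PySem.List.pyGetD dane j (0, 0)))]
  congr 1
  -- the candidate list of B for this i
  set di := PySem.List.pyGetD dane i (0, 0) with hdi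
  rw [(pvGroups_getD dane (di.1 - di.2)).1, (pvGroups_getD dane (di.1 + di.2)).2]
  -- sorted(set(G1 ++ G2)) = the index range filtered by "on either diagonal of i"
  have hcand :
      PySem.List.sorted
        (PySem.Set.ofList
          (((PySem.List.pyRange 0 dane.length 1).filter
              (fun j => (PySem.List.pyGetD dane j (0, 0)).1 - (PySem.List.pyGetD dane j (0, 0)).2 = di.1 - di.2))
           ++ ((PySem.List.pyRange 0 dane.length 1).filter
              (fun j => (PySem.List.pyGetD dane j (0, 0)).1 + (PySem.List.pyGetD dane j (0, 0)).2 = di.1 + di.2))))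
        (fun x => x) false
      = (PySem.List.pyRange 0 dane.length 1).filter
          (fun j =>
            (PySem.List.pyGetD dane j (0, 0)).1 - (PySem.List.pyGetD dane j (0, 0)).2 = di.1 - di.2
            ∨ (PySem.List.pyGetD dane j (0, 0)).1 + (PySem.List.pyGetD dane j (0, 0)).2 = di.1 + di.2) := by
    apply PySem.List.sorted_eq_of_perm_of_pairwise_lt
    · -- the filtered range is a permutation of the deduplicated concatenation
      rw [List.perm_ext_iff_of_nodup
            ((PySem.List.nodup_pyRange_one 0 dane.length).filter _)
            (PySem.Set.nodup_ofList _)]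
      intro a
      simp [PySem.Set.mem_ofList, List.mem_filter, or_and_left]
      tauto
    · exact (PySem.List.pairwise_lt_pyRange_one 0 dane.length).filter _
  rw [hcand, List.filter_filter]
  -- A's inner index list: split range(0,n) at i+1; the low part dies on j > i
  rw [PySem.List.pyRange_one_append 0 (i + 1) dane.length (by omega) (by omega), List.filter_append]
  have hlow :
      (PySem.List.pyRange 0 (i + 1) 1).filter
        (fun j => decide (i < j) &&
          decide ((PySem.List.pyGetD dane j (0, 0)).1 - (PySem.List.pyGetD dane j (0, 0)).2 = di.1 - di.2
            ∨ (PySem.List.pyGetD dane j (0, 0)).1 + (PySem.List.pyGetD dane j (0, 0)).2 = di.1 + di.2)) = [] := by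
    apply List.filter_eq_nil_iff.2
    intro j hj
    have : 0 ≤ j ∧ j < i + 1 := by simpa using (PySem.List.mem_pyRange_one).1 hj
    simp [show ¬ i < j by omega]
  rw [hlow, List.nil_append]
  -- on range(i+1,n): j > i always holds, and the diagonal test matches A's abs test
  have hfil : (PySem.List.pyRange (i + 1) dane.length 1).filter
        (fun j => decide (i < j) &&
          decide ((PySem.List.pyGetD dane j (0, 0)).1 - (PySem.List.pyGetD dane j (0, 0)).2 = di.1 - di.2
            ∨ (PySem.List.pyGetD dane j (0, 0)).1 + (PySem.List.pyGetD dane j (0, 0)).2 = di.1 + di.2))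
      = (PySem.List.pyRange (i + 1) dane.length 1).filter
        (fun j => (di.1 - (PySem.List.pyGetD dane j (0, 0)).1).natAbs
            = (di.2 - (PySem.List.pyGetD dane j (0, 0)).2).natAbs) := by
    apply List.filter_congr
    intro j hj
    have : i + 1 ≤ j ∧ j < n := by
      have := (PySem.List.mem_pyRange_one).1 hj; simpa [hn] using this
    set dj := PySem.List.pyGetD dane j (0, 0)
    have habs : ((di.1 - dj.1).natAbs = (di.2 - dj.2).natAbs)
        ↔ (dj.1 - dj.2 = di.1 - di.2 ∨ dj.1 + dj.2 = di.1 + di.2) := by omega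
    simp [show i < j by omega, habs]
  rw [hfil]
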